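-- pv_equiv track=rewrite | github.com/kevin-quiroz/Sintaxis | AguAFD.py | automataComa
-- ===== SOURCE A (Python) =====
-- ESTADO_FINAL = "ESTADO FINAL"
--
-- ESTADO_NO_FINAL = "NO ACEPTADO"
--
-- ESTADO_TRAMPA = "EN ESTADO TRAMPA"
--
-- def automataComa(lexema):
--     estado = 0
--     estadoFinal = [1]
--     for caracter in lexema:
--         if estado == 0 and caracter == ",":
--             estado = 1
--         else:
--             estado = -1
--             break
--     if estado == -1:
--         return ESTADO_TRAMPA
--     elif estado in estadoFinal:
--         return ESTADO_FINAL
--     else: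
--         return ESTADO_NO_FINAL
-- ===== SOURCE B (Python) =====
-- ESTADO_FINAL = "ESTADO FINAL"
--
-- ESTADO_NO_FINAL = "NO ACEPTADO"
--
-- ESTADO_TRAMPA = "EN ESTADO TRAMPA"
--
-- def automataComa(lexema):
--     items = list(lexema)
--     if items == [","]:
--         return ESTADO_FINAL
--     elif not items:
--         return ESTADO_NO_FINAL
--     else:
--         return ESTADO_TRAMPA
-- ===== Notes on version B (the rewrite author's own statement) =====
-- stated objective: simpler
-- what changed: Replaces the per-character DFA state loop with a single closed-form pattern match on the materialized character list ([','] / [] / anything else).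
import Mathlib
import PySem

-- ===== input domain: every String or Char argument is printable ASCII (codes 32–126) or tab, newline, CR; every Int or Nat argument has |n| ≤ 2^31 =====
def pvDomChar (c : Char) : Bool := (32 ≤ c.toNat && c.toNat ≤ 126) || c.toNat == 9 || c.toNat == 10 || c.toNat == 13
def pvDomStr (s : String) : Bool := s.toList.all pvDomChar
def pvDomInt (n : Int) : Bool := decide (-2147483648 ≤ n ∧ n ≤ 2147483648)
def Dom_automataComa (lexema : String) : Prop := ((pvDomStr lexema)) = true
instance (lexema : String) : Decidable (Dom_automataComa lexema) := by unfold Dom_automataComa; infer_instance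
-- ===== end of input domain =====

-- B replaces A's character-by-character DFA loop with one pattern match on the character list.
-- ===== PORT A =====
-- loop with break: returns the final 'estado'; break sets estado = -1 and stops.
def automataComaLoop (estado : Int) (cs : List Char) : Int :=
  match cs with
  | [] => estado
  | c :: rest =>
    if estado == 0 && c == ',' then automataComaLoop 1 rest
    else (-1)

def automataComa (lexema : String) : String :=
  let estado := automataComaLoop 0 lexema.toList
  let estadoFinal : List Int := [1]
  if estado == -1 then "EN ESTADO TRAMPA"
  else if estado ∈ estadoFinal then "ESTADO FINAL"
  else "NO ACEPTADO"

-- ===== PORT B =====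
def automataComa_alt (lexema : String) : String :=
  match lexema.toList with
  | [','] => "ESTADO FINAL"
  | [] => "NO ACEPTADO"
  | _ => "EN ESTADO TRAMPA"

-- ===== PRECONDITION & SPEC =====
def Spec_automataComa (lexema : String) (out : String) : Prop := out = automataComa_alt lexema
instance (lexema : String) (out : String) : Decidable (Spec_automataComa lexema out) := by unfold Spec_automataComa; infer_instance

-- ===== CLAIM (what is proved, stated in full; the proofs are below) =====
def Claim_equal_automataComa : Prop := ∀ (lexema : String), Dom_automataComa lexema → Spec_automataComa lexema (automataComa lexema)

-- ===== LEMMAS AND PROOFS =====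

-- ===== VERDICT (by name: the statement is the Claim_ definition above) =====
theorem automataComa_spec : Claim_equal_automataComa := by
  intro lexema _
  unfold Spec_automataComa automataComa automataComa_alt
  match h : lexema.toList with
  | [] => simp [automataComaLoop]
  | [c] =>
    by_cases hc : c = ','
    · subst hc; simp [automataComaLoop]
    · simp [automataComaLoop, hc]
  | c :: c2 :: rest =>
    by_cases hc : c = ','
    · subst hc; simp [automataComaLoop]
    · simp [automataComaLoop, hc]
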